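-- pv_equiv track=rewrite | github.com/AzizAub/assignment_1.3 | src/nonogram.py | parse_clue
-- ===== SOURCE A (Python) =====
-- def parse_clue(clue_line):
--     """Parse a clue string into a list of (count, color) tuples"""
--     clues = []
--     parts = clue_line.split()
--
--     for part in parts:
--         i = 0
--         while i < len(part) and part[i].isdigit():
--             i += 1
--
--         count = int(part[:i]) if i > 0 else 0
--         color = part[i:] if i < len(part) else ''
--
--         if count > 0 and color:
--             clues.append((count, color))
--
--     return clues
-- ===== SOURCE B (Python) =====
-- def parse_clue(clue_line):
--     """Parse a clue string into a list of (count, color) tuples.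
--
--     Single left-to-right character scan with digit/color buffers; whitespace
--     flushes the current token (no split(), no index-based inner scan)."""
--     clues = []
--     digits, color = "", ""
--     for ch in clue_line + " ":
--         if ch.isspace():
--             if digits and color:
--                 count = int(digits)
--                 if count > 0:
--                     clues.append((count, color))
--             digits, color = "", ""
--         elif ch.isdigit() and not color:
--             digits += ch
--         else:
--             color += ch
--     return clues
-- ===== Notes on version B (the rewrite author's own statement) =====
-- stated objective: alternative
-- what changed: Replaces split()-into-tokens plus a per-token index-based digit-scanning while loop by a single left-to-right character scan that keeps digit/color buffers and flushes a clue at each whitespace boundary.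
import Mathlib
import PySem

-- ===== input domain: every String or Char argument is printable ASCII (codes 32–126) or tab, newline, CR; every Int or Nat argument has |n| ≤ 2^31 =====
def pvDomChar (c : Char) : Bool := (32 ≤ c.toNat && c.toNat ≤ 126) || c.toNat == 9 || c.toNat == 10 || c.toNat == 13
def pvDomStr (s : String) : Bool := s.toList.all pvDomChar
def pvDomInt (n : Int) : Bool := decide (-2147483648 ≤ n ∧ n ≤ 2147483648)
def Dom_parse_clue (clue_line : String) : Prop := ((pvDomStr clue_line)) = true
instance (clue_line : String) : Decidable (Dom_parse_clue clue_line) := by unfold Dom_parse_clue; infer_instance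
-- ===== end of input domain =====

-- B replaces split() + per-token index scan by one character-at-a-time state machine; alternative decomposition, same value.

-- ===== PORT A =====
-- the while loop 'i = 0; while i < len(part) and part[i].isdigit(): i += 1' as the count of leading digits
def pvDigitPrefixLen (part : List Char) : Nat :=
  match part with
  | [] => 0
  | c :: rest => if PySem.Chars.isdigit c then pvDigitPrefixLen rest + 1 else 0

def pvTokA (clues : List (Int × String)) (part : List Char) : List (Int × String) :=
  let i := pvDigitPrefixLen part
  -- int(part[:i]): part[:i] is a nonempty run of ASCII digits when i > 0, so ofChars? is some (getD never fires)
  let count : Int := if 0 < i then (PySem.Int.ofChars? (part.take i)).getD 0 else 0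
  let color : List Char := if i < part.length then part.drop i else []
  if count > 0 ∧ color ≠ [] then clues ++ [(count, String.ofList color)] else clues

def parse_clue (clue_line : String) : List (Int × String) :=
  (PySem.Chars.split₀ clue_line.toList).foldl pvTokA []

-- ===== PORT B =====
def pvStepB (st : List (Int × String) × List Char × List Char) (c : Char) :
    List (Int × String) × List Char × List Char :=
  let (clues, digits, color) := st
  if PySem.Chars.isspace c then
    let clues' :=
      if digits ≠ [] ∧ color ≠ [] then
        -- int(digits): digits is a nonempty run of ASCII digits, so ofChars? is some (getD never fires)
        let count : Int := (PySem.Int.ofChars? digits).getD 0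
        if count > 0 then clues ++ [(count, String.ofList color)] else clues
      else clues
    (clues', [], [])
  else if PySem.Chars.isdigit c && color.isEmpty then (clues, digits ++ [c], color)
  else (clues, digits, color ++ [c])

-- 'for ch in clue_line + " "' iterates the characters of clue_line followed by one space
def parse_clue_alt (clue_line : String) : List (Int × String) :=
  ((clue_line.toList ++ [' ']).foldl pvStepB ([], [], [])).1

-- ===== PRECONDITION & SPEC =====
def Spec_parse_clue (clue_line : String) (out : List (Int × String)) : Prop := out = parse_clue_alt clue_line
instance (clue_line : String) (out : List (Int × String)) : Decidable (Spec_parse_clue clue_line out) := by unfold Spec_parse_clue; infer_instance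

-- ===== CLAIM (what is proved, stated in full; the proofs are below) =====
def Claim_equal_parse_clue : Prop := ∀ (clue_line : String), Dom_parse_clue clue_line → Spec_parse_clue clue_line (parse_clue clue_line)

-- ===== LEMMAS AND PROOFS =====

theorem pvDpl_eq_takeWhile_length (p : List Char) :
    pvDigitPrefixLen p = (p.takeWhile PySem.Chars.isdigit).length := by
  induction p with
  | nil => rfl
  | cons c r ih =>
    simp [pvDigitPrefixLen, List.takeWhile]
    by_cases h : PySem.Chars.isdigit c <;> simp [h, ih]

theorem pvTake_dpl (p : List Char) :
    p.take (pvDigitPrefixLen p) = p.takeWhile PySem.Chars.isdigit := by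
  induction p with
  | nil => rfl
  | cons c r ih =>
    by_cases h : PySem.Chars.isdigit c <;>
      simp [pvDigitPrefixLen, List.takeWhile, h, ih]

theorem pvDrop_dpl (p : List Char) :
    p.drop (pvDigitPrefixLen p) = p.dropWhile PySem.Chars.isdigit := by
  induction p with
  | nil => rfl
  | cons c r ih =>
    by_cases h : PySem.Chars.isdigit c <;>
      simp [pvDigitPrefixLen, List.dropWhile, h, ih]

-- one non-space character advances B's buffers exactly as extending the consumed token prefix
theorem pvStepB_nonspace (L : List (Int × String)) (p : List Char) (c : Char)
    (h : PySem.Chars.isspace c = false) :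
    pvStepB (L, p.takeWhile PySem.Chars.isdigit, p.dropWhile PySem.Chars.isdigit) c
      = (L, (p ++ [c]).takeWhile PySem.Chars.isdigit, (p ++ [c]).dropWhile PySem.Chars.isdigit) := by
  simp only [pvStepB, h, Bool.false_eq_true, if_false]
  by_cases hall : p.dropWhile PySem.Chars.isdigit = []
  · have hp : p.takeWhile PySem.Chars.isdigit = p := by
      have := List.takeWhile_append_dropWhile (p := PySem.Chars.isdigit) (l := p)
      rw [hall, List.append_nil] at this; exact this
    by_cases hd : PySem.Chars.isdigit c
    · simp [hall, hd, hp, List.takeWhile_append, List.dropWhile_append, List.takeWhile, List.dropWhile]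
    · simp [hall, hd, hp, List.takeWhile_append, List.dropWhile_append, List.takeWhile, List.dropWhile]
  · have hne : (p.dropWhile PySem.Chars.isdigit).isEmpty = false := by
      simpa [List.isEmpty_iff] using hall
    simp [hne, List.takeWhile_append, List.dropWhile_append]
    intro hlen
    exfalso
    have hlens := congrArg List.length (List.takeWhile_append_dropWhile (p := PySem.Chars.isdigit) (l := p))
    simp only [List.length_append] at hlens
    have hdw : (List.dropWhile PySem.Chars.isdigit p).length = 0 := by omega
    exact hall (List.eq_nil_of_length_eq_zero hdw)

-- a whitespace character flushes B's buffers into exactly A's per-token step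
theorem pvStepB_space (L : List (Int × String)) (p : List Char) (c : Char)
    (h : PySem.Chars.isspace c = true) :
    pvStepB (L, p.takeWhile PySem.Chars.isdigit, p.dropWhile PySem.Chars.isdigit) c
      = (pvTokA L p, [], []) := by
  have hlens := congrArg List.length (List.takeWhile_append_dropWhile (p := PySem.Chars.isdigit) (l := p))
  simp only [List.length_append] at hlens
  simp only [pvStepB, h, if_true, pvTokA]
  by_cases htw : p.takeWhile PySem.Chars.isdigit = []
  · have hi : pvDigitPrefixLen p = 0 := by rw [pvDpl_eq_takeWhile_length, htw]; rfl
    simp [htw, hi]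
  · by_cases hdw : p.dropWhile PySem.Chars.isdigit = []
    · have hi : pvDigitPrefixLen p = p.length := by
        rw [pvDpl_eq_takeWhile_length]
        have : (p.dropWhile PySem.Chars.isdigit).length = 0 := by rw [hdw]; rfl
        omega
      simp [hdw, hi]
    · have htwlen : 0 < (p.takeWhile PySem.Chars.isdigit).length :=
        List.length_pos_of_ne_nil htw
      have hdwlen : 0 < (p.dropWhile PySem.Chars.isdigit).length :=
        List.length_pos_of_ne_nil hdw
      have hi : 0 < pvDigitPrefixLen p := by rw [pvDpl_eq_takeWhile_length]; exact htwlen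
      have hilt : pvDigitPrefixLen p < p.length := by rw [pvDpl_eq_takeWhile_length]; omega
      simp [htw, hdw, hi, hilt, pvTake_dpl, pvDrop_dpl]

theorem pvGo_acc (cs : List Char) (cur : List Char) (acc : List (List Char)) :
    PySem.Chars.split₀.go cs cur acc = acc.reverse ++ PySem.Chars.split₀.go cs cur [] := by
  induction cs generalizing cur acc with
  | nil => simp only [PySem.Chars.split₀.go]; split_ifs <;> simp
  | cons c cs ih =>
    simp only [PySem.Chars.split₀.go]
    by_cases hs : PySem.Chars.isspace c
    · by_cases hcur : cur.isEmpty
      · simp only [hs, hcur, if_true]; exact ih _ _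
      · simp only [hs, hcur, if_true, Bool.false_eq_true, if_false]
        rw [ih _ (cur.reverse :: acc), ih _ [cur.reverse]]
        simp
    · simp only [hs, Bool.false_eq_true, if_false]
      exact ih _ _

theorem pvMain (cs : List Char) (p : List Char) (L : List (Int × String)) :
    ((cs ++ [' ']).foldl pvStepB (L, p.takeWhile PySem.Chars.isdigit, p.dropWhile PySem.Chars.isdigit)).1
      = (PySem.Chars.split₀.go cs p.reverse []).foldl pvTokA L := by
  induction cs generalizing p L with
  | nil =>
    have hsp : PySem.Chars.isspace ' ' = true := by decide
    simp only [List.nil_append, List.foldl_cons, List.foldl_nil,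
      pvStepB_space L p ' ' hsp, PySem.Chars.split₀.go]
    by_cases hp : p = []
    · subst hp; simp [pvTokA, pvDigitPrefixLen]
    · have : (p.reverse).isEmpty = false := by simp [hp]
      simp [this]
  | cons c cs ih =>
    by_cases hs : PySem.Chars.isspace c
    · simp only [List.cons_append, List.foldl_cons, pvStepB_space L p c hs,
        PySem.Chars.split₀.go, hs, if_true]
      have hB := ih ([] : List Char) (pvTokA L p)
      simp only [List.takeWhile_nil, List.dropWhile_nil, List.reverse_nil] at hB
      by_cases hp : p = []
      · subst hp
        have hL : pvTokA L [] = L := by simp [pvTokA, pvDigitPrefixLen]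
        simp only [List.reverse_nil, List.isEmpty_nil, if_true]
        rw [hB, hL]
      · have hne : (p.reverse).isEmpty = false := by simp [hp]
        simp only [hne, Bool.false_eq_true, if_false, List.reverse_reverse]
        rw [hB, pvGo_acc cs [] [p]]
        simp
    · have hs' : PySem.Chars.isspace c = false := by simpa using hs
      simp only [List.cons_append, List.foldl_cons, pvStepB_nonspace L p c hs',
        PySem.Chars.split₀.go, hs', Bool.false_eq_true, if_false]
      have := ih (p ++ [c]) L
      simpa using this

-- ===== VERDICT (by name: the statement is the Claim_ definition above) =====
theorem parse_clue_spec : Claim_equal_parse_clue := by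
  intro s _
  unfold Spec_parse_clue parse_clue parse_clue_alt PySem.Chars.split₀
  have := pvMain s.toList [] []
  simpa using this.symm
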